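-- pv_equiv track=rewrite | github.com/AlejandroCanals/Ejercicios | Ejercicios Generales/ejercicio1.1.py | cada_cinco_letras_mayuscula
-- ===== SOURCE A (Python) =====
-- def cada_cinco_letras_mayuscula(string):
--     contador = 0
--     resultado5 = ""
--     first_letter_word = True
--
--     for char in string:
--         if contador == 6:
--             resultado5 += char.upper()
--             contador = 0
--
--         elif first_letter_word :
--             resultado5 += char.upper()
--             first_letter_word = False
--             contador = 0
--         else :
--             resultado5 += char.lower()
--
--         if char == " ":
--             first_letter_word = True
--
--         else :
--             contador += 1
--
--     return resultado5
-- ===== SOURCE B (Python) =====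
-- def cada_cinco_letras_mayuscula(string):
--     # Segment the string into maximal runs of non-space characters; rebuild each
--     # run by uppercasing the chars at within-run index 0, 6, 12, ... and
--     # lowercasing the rest; spaces pass through unchanged.
--     out = []
--     i = 0
--     n = len(string)
--     while i < n:
--         if string[i] == ' ':
--             out.append(' ')
--             i += 1
--         else:
--             j = i
--             while j < n and string[j] != ' ':
--                 j += 1
--             word = string[i:j]
--             out.append(''.join(c.upper() if k % 6 == 0 else c.lower() for k, c in enumerate(word)))
--             i = j
--     return ''.join(out)
-- ===== Notes on version B (the rewrite author's own statement) =====
-- stated objective: alternative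
-- what changed: Replaces A's running counter/first-letter-flag state machine over characters by segmenting the string into maximal non-space runs and rebuilding each run from its within-run indices (uppercase at index % 6 == 0, lowercase otherwise), spaces passing through unchanged.
import Mathlib
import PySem

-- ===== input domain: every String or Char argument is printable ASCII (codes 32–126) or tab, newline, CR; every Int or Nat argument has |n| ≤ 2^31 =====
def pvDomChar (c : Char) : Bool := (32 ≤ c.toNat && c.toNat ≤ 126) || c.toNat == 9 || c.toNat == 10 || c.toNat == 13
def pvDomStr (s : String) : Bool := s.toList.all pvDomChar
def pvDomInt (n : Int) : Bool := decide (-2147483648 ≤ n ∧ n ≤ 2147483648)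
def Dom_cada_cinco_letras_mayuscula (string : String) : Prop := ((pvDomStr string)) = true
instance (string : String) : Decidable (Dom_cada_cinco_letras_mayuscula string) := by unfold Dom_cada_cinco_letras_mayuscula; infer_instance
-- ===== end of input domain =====

-- B replaces A's running counter/flag character machine by segmenting the string into
-- maximal runs of non-space characters and rebuilding each run from within-run indices
-- (upper at index ≡ 0 mod 6, lower otherwise); objective: alternative decomposition, same cost.

-- ===== PORT A =====
-- one loop iteration of A: state = (contador, resultado5, first_letter_word)
def pvStepA (st : Int × List Char × Bool) (char : Char) : Int × List Char × Bool :=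
  let contador := st.1
  let resultado5 := st.2.1
  let first := st.2.2
  let st' :=
    if contador == 6 then ((0 : Int), resultado5 ++ [PySem.Chars.upperChar char], first)
    else if first then ((0 : Int), resultado5 ++ [PySem.Chars.upperChar char], false)
    else (contador, resultado5 ++ [PySem.Chars.lowerChar char], first)
  if char == ' ' then (st'.1, st'.2.1, true)
  else (st'.1 + 1, st'.2.1, st'.2.2)

def cada_cinco_letras_mayuscula (string : String) : String :=
  String.mk (string.toList.foldl pvStepA ((0 : Int), ([] : List Char), true)).2.1

-- ===== PORT B =====
-- Source B's per-word comprehension: upper at within-word index k with k % 6 == 0, else lower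
def pvWordB (w : List Char) : List Char :=
  (PySem.List.enumerate w 0).map (fun kc =>
    if PySem.Int.mod kc.1 6 == 0 then PySem.Chars.upperChar kc.2 else PySem.Chars.lowerChar kc.2)

-- Source B's outer while loop: a space passes through; otherwise the inner scan for the end of
-- the run plus the slice string[i:j] is ported as takeWhile / dropWhile on (· ≠ ' ') (exact)
def pvSegB : List Char → List Char
  | [] => []
  | c :: cs =>
    if c = ' ' then ' ' :: pvSegB cs
    else pvWordB ((c :: cs).takeWhile (· ≠ ' ')) ++ pvSegB (cs.dropWhile (· ≠ ' '))
termination_by l => l.length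
decreasing_by
  · simp
  · exact Nat.lt_succ_of_le (List.length_dropWhile_le _ _)

def cada_cinco_letras_mayuscula_alt (string : String) : String :=
  String.mk (pvSegB string.toList)

-- ===== PRECONDITION & SPEC =====
def Spec_cada_cinco_letras_mayuscula (string : String) (out : String) : Prop := out = cada_cinco_letras_mayuscula_alt string
instance (string : String) (out : String) : Decidable (Spec_cada_cinco_letras_mayuscula string out) := by unfold Spec_cada_cinco_letras_mayuscula; infer_instance

-- ===== CLAIM (what is proved, stated in full; the proofs are below) =====
def Claim_equal_cada_cinco_letras_mayuscula : Prop := ∀ (string : String), Dom_cada_cinco_letras_mayuscula string → Spec_cada_cinco_letras_mayuscula string (cada_cinco_letras_mayuscula string)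

-- ===== LEMMAS AND PROOFS =====

lemma pvUpSpace : PySem.Chars.upperChar ' ' = ' ' := by decide
lemma pvLowSpace : PySem.Chars.lowerChar ' ' = ' ' := by decide

-- common characterisation: output char by char, j = within-run index (reset after a space)
def pvSpecRun : List Char → Nat → List Char
  | [], _ => []
  | ch :: cs, j =>
    if ch = ' ' then ' ' :: pvSpecRun cs 0
    else (if j % 6 = 0 then PySem.Chars.upperChar ch else PySem.Chars.lowerChar ch) :: pvSpecRun cs (j + 1)

lemma pvSpecRun_dropWhile_indep (l : List Char) (j j' : Nat) :
    pvSpecRun (l.dropWhile (fun x => !decide (x = ' '))) j = pvSpecRun (l.dropWhile (fun x => !decide (x = ' '))) j' := by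
  induction l with
  | nil => rfl
  | cons c cs ih =>
      by_cases hc : c = ' '
      · subst hc; simp [List.dropWhile, pvSpecRun]
      · simpa [List.dropWhile, hc] using ih

lemma pvEnumMod (s : Nat) : (PySem.Int.mod (s : Int) 6 == 0) = decide (s % 6 = 0) := by
  rw [show (6 : Int) = ((6 : Nat) : Int) by norm_num, PySem.Int.mod_natCast]
  by_cases hs : s % 6 = 0
  · simp [hs]
  · simp [hs]; omega

lemma pvSpecRun_word (w : List Char) (h : ∀ c ∈ w, c ≠ ' ') :
    ∀ (s : Nat) (rest : List Char),
    pvSpecRun (w ++ rest) s =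
      (PySem.List.enumerate w (s : Int)).map (fun kc =>
        if PySem.Int.mod kc.1 6 == 0 then PySem.Chars.upperChar kc.2
        else PySem.Chars.lowerChar kc.2) ++ pvSpecRun rest (s + w.length) := by
  induction w with
  | nil => intro s rest; simp [PySem.List.enumerate]
  | cons c cs ih =>
      intro s rest
      have hc : c ≠ ' ' := h c (by simp)
      have hcs : ∀ x ∈ cs, x ≠ ' ' := fun x hx => h x (by simp [hx])
      have hcast : ((s : Int) + 1) = ((s + 1 : Nat) : Int) := by push_cast; ring
      simp only [List.cons_append, pvSpecRun, PySem.List.enumerate_cons, List.map_cons,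
        pvEnumMod, hcast, ih hcs (s + 1) rest]
      rw [if_neg hc]
      have hlen : s + (c :: cs).length = s + 1 + cs.length := by simp; omega
      rw [hlen]
      by_cases hs : s % 6 = 0 <;> simp [hs]

lemma pvSegB_eq (cs : List Char) : pvSegB cs = pvSpecRun cs 0 := by
  induction cs using pvSegB.induct with
  | case1 => simp [pvSegB, pvSpecRun]
  | case2 cs ih => simp [pvSegB, pvSpecRun, ih]
  | case3 c cs hc ih =>
      have hw : ∀ x ∈ (c :: cs).takeWhile (fun ch => decide (ch ≠ ' ')), x ≠ ' ' := by
        intro x hx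
        simpa using List.mem_takeWhile_imp hx
      have hsplit : (c :: cs).takeWhile (fun ch => decide (ch ≠ ' ')) ++
          (c :: cs).dropWhile (fun ch => decide (ch ≠ ' ')) = c :: cs :=
        List.takeWhile_append_dropWhile
      have hdrop : (c :: cs).dropWhile (fun ch => decide (ch ≠ ' ')) =
          cs.dropWhile (fun ch => decide (ch ≠ ' ')) := by
        simp [List.dropWhile, hc]
      rw [pvSegB, if_neg hc]
      conv_rhs => rw [← hsplit]
      rw [pvSpecRun_word _ hw 0 _, hdrop, pvWordB, ih]
      simp
      exact pvSpecRun_dropWhile_indep cs 0 _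

-- A's loop: j is the within-run index the next char will get; the state invariant ties
-- (contador, first) to j
lemma pvA_run : ∀ (cs : List Char) (c : Int) (f : Bool) (j : Nat) (acc : List Char),
    (if f then c ≠ 6 ∧ j = 0 else 1 ≤ j ∧ c = ((j - 1) % 6 : Nat) + 1) →
    (cs.foldl pvStepA (c, acc, f)).2.1 = acc ++ pvSpecRun cs j := by
  intro cs
  induction cs with
  | nil => intro c f j acc _; simp [pvSpecRun]
  | cons ch cs ih =>
      intro c f j acc hinv
      cases f with
      | true =>
          obtain ⟨hc6, hj⟩ := hinv
          subst hj
          by_cases hch : ch = ' '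
          · subst hch
            rw [List.foldl_cons]
            have hstep : pvStepA (c, acc, true) ' ' = (0, acc ++ [' '], true) := by
              by_cases h6 : c = 6
              · exact absurd h6 hc6
              · simp [pvStepA, h6, pvUpSpace]
            rw [hstep, ih 0 true 0 _ (by norm_num)]
            simp [pvSpecRun]
          · rw [List.foldl_cons]
            have hstep : pvStepA (c, acc, true) ch =
                (1, acc ++ [PySem.Chars.upperChar ch], false) := by
              by_cases h6 : c = 6
              · exact absurd h6 hc6
              · simp [pvStepA, h6, hch]
            rw [hstep, ih 1 false 1 _ (by norm_num)]
            simp [pvSpecRun, hch]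
      | false =>
          obtain ⟨hj1, hceq⟩ := hinv
          by_cases h6 : c = 6
          · have hx : (6 : Int) = ((j - 1) % 6 : Nat) + 1 := by rw [← h6]; exact hceq
            have hmod : (j - 1) % 6 = 5 := by omega
            have hjmod : j % 6 = 0 := by omega
            by_cases hsp : ch = ' '
            · subst hsp
              rw [List.foldl_cons]
              have hstep : pvStepA (c, acc, false) ' ' = (0, acc ++ [' '], true) := by
                simp [pvStepA, h6, pvUpSpace]
              rw [hstep, ih 0 true 0 _ (by norm_num)]
              simp [pvSpecRun]
            · rw [List.foldl_cons]
              have hstep : pvStepA (c, acc, false) ch =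
                  (1, acc ++ [PySem.Chars.upperChar ch], false) := by
                simp [pvStepA, h6, hsp]
              rw [hstep, ih 1 false (j + 1) _ (by simp [hjmod])]
              simp [pvSpecRun, hsp, hjmod]
          · have hmod : (j - 1) % 6 ≠ 5 := by
              intro h5
              apply h6
              rw [hceq, h5]; norm_num
            have hjmod : j % 6 ≠ 0 := by omega
            by_cases hsp : ch = ' '
            · subst hsp
              rw [List.foldl_cons]
              have hstep : pvStepA (c, acc, false) ' ' = (c, acc ++ [' '], true) := by
                simp [pvStepA, h6, pvLowSpace]
              rw [hstep, ih c true 0 _ (by simp [h6])]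
              simp [pvSpecRun]
            · rw [List.foldl_cons]
              have hstep : pvStepA (c, acc, false) ch =
                  (c + 1, acc ++ [PySem.Chars.lowerChar ch], false) := by
                simp [pvStepA, h6, hsp]
              have hnext : c + 1 = ((j % 6 : Nat) : Int) + 1 := by
                rw [hceq]; push_cast; omega
              rw [hstep, ih (c + 1) false (j + 1) _ ?_]
              · simp [pvSpecRun, hsp, hjmod]
              · refine ⟨by omega, ?_⟩
                simpa using hnext

-- ===== VERDICT (by name: the statement is the Claim_ definition above) =====
theorem cada_cinco_letras_mayuscula_spec : Claim_equal_cada_cinco_letras_mayuscula := by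
  intro s _
  show cada_cinco_letras_mayuscula s = cada_cinco_letras_mayuscula_alt s
  unfold cada_cinco_letras_mayuscula cada_cinco_letras_mayuscula_alt
  rw [pvA_run s.toList 0 true 0 [] (by norm_num), pvSegB_eq]
  simp
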